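-- pv_equiv track=rewrite | github.com/woodywarhol9/algorithm-practice | programmers/solved/lv2_모음사전.py | solution
-- ===== SOURCE A (Python) =====
-- from itertools import product
--
-- def solution(word):
--     word_dic = set()
--     for p in product(["", "A", "E", "I", "O", "U"], repeat = 5):
--         word_dic.add("".join(p))
--     word_dic = sorted(word_dic)
--     for idx, w in enumerate(word_dic):
--         if w == word:
--             return idx
-- ===== SOURCE B (Python) =====
-- def solution(word):
--     vowels = "AEIOU"
--     if len(word) > 5 or any(c not in vowels for c in word):
--         return None
--     rank = 0
--     for i, c in enumerate(word):
--         rank += vowels.index(c) * ((5 ** (5 - i) - 1) // 4) + 1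
--     return rank
-- ===== Notes on version B (the rewrite author's own statement) =====
-- stated objective: faster
-- what changed: Replaces generating, deduplicating and sorting all 6^5 products then scanning for the word with a direct positional ranking formula: each letter contributes index*(5^(5-i)-1)/4 + 1.
import Mathlib
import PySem

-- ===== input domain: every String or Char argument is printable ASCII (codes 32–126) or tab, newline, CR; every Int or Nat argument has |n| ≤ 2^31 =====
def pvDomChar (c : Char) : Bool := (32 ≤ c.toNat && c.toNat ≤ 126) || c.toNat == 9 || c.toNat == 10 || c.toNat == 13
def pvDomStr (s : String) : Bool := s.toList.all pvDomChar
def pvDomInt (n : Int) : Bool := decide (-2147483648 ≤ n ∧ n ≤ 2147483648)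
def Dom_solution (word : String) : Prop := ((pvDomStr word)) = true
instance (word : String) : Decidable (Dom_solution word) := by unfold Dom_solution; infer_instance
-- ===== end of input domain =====

-- B replaces A's generate-dedup-sort-scan over all 6^5 products by a direct O(len) positional ranking formula.

-- ===== PORT A =====
-- the six pieces ["", "A", "E", "I", "O", "U"], as character lists
def pvPieces : List (List Char) := [[], ['A'], ['E'], ['I'], ['O'], ['U']]

-- itertools.product(pvPieces, repeat = n), in itertools' order (rightmost varies fastest)
def pvProd : Nat → List (List (List Char))
  | 0 => [[]]
  | n + 1 => pvPieces.flatMap (fun x => (pvProd n).map (fun t => x :: t))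

-- the loop 'for idx, w in enumerate(word_dic): if w == word: return idx'
def pvFind : List (Int × List Char) → List Char → Option Int
  | [], _ => none
  | (i, w) :: rest, t => if w = t then some i else pvFind rest t

def solution (word : String) : Option Int :=
  let wordDic : PySem.Set (List Char) :=
    (pvProd 5).foldl (fun s p => PySem.Set.add s (PySem.Chars.join [] p)) PySem.Set.empty
  let sortedDic := PySem.List.sorted wordDic (fun x => x)
  pvFind (PySem.List.enumerate sortedDic 0) word.toList

-- ===== PORT B =====
def pvVowels : List Char := ['A', 'E', 'I', 'O', 'U']

-- the loop 'for i, c in enumerate(word): rank += vowels.index(c) * ((5 ** (5 - i) - 1) // 4) + 1'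
def pvAltLoop : List (Int × Char) → Int → Int
  | [], r => r
  | (i, c) :: rest, r =>
      pvAltLoop rest
        (r + ((PySem.List.index? pvVowels c).getD 0 : Int)
               * PySem.Int.floordiv ((5 : Int) ^ (5 - i).toNat - 1) 4 + 1)

def solution_alt (word : String) : Option Int :=
  let cs := word.toList
  if 5 < cs.length ∨ ∃ c ∈ cs, c ∉ pvVowels then none
  else some (pvAltLoop (PySem.List.enumerate cs 0) 0)

-- ===== PRECONDITION & SPEC =====
def Spec_solution (word : String) (out : Option Int) : Prop := out = solution_alt word
instance (word : String) (out : Option Int) : Decidable (Spec_solution word out) := by unfold Spec_solution; infer_instance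

-- ===== CLAIM (what is proved, stated in full; the proofs are below) =====
def Claim_equal_solution : Prop := ∀ (word : String), Dom_solution word → Spec_solution word (solution word)

-- ===== LEMMAS AND PROOFS =====

-- the vowel dictionary of words of length ≤ k, in Python's sorted (lexicographic) order
def pvGen : Nat → List (List Char)
  | 0 => [[]]
  | k + 1 => [] :: pvVowels.flatMap (fun v => (pvGen k).map (v :: ·))

-- the position of a vowel in pvVowels
def pvVIdx (c : Char) : Int :=
  if c = 'A' then 0 else if c = 'E' then 1 else if c = 'I' then 2 else if c = 'O' then 3 else 4

-- the rank of a valid word inside pvGen k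
def pvRank : Nat → List Char → Int
  | _, [] => 0
  | 0, _ :: _ => 0
  | k + 1, c :: rest => 1 + pvVIdx c * ((pvGen k).length : Int) + pvRank k rest

theorem pv_rank_nil (k : Nat) : pvRank k [] = 0 := by cases k <;> rfl

theorem pv_join_eq_flatten (l : List (List Char)) : PySem.Chars.join [] l = l.flatten := by
  show [].intercalate l = l.flatten
  induction l with
  | nil => rfl
  | cons a t ih => cases t <;> simp_all [List.intercalate]

theorem pv_cons_lt_cons (a b : Char) (h : a < b) (l m : List Char) : a :: l < b :: m :=
  (List.lt_iff_lex_lt _ _).mpr (List.Lex.rel h)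

theorem pv_mem_gen (k : Nat) (t : List Char) :
    t ∈ pvGen k ↔ t.length ≤ k ∧ ∀ c ∈ t, c ∈ pvVowels := by
  induction k generalizing t with
  | zero =>
    simp only [pvGen, List.mem_singleton]
    constructor
    · rintro rfl; simp
    · rintro ⟨h1, _⟩; exact List.eq_nil_of_length_eq_zero (by omega)
  | succ k ih =>
    simp only [pvGen, List.mem_cons, List.mem_flatMap, List.mem_map]
    constructor
    · rintro (rfl | ⟨v, hv, y, hy, rfl⟩)
      · simp
      · obtain ⟨hy1, hy2⟩ := (ih y).mp hy
        refine ⟨by simpa using hy1, ?_⟩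
        intro c hc
        rcases List.mem_cons.mp hc with rfl | hc
        · exact hv
        · exact hy2 c hc
    · rintro ⟨h1, h2⟩
      cases t with
      | nil => exact Or.inl rfl
      | cons c rest =>
        refine Or.inr ⟨c, h2 c List.mem_cons_self, rest,
          (ih rest).mpr ⟨by simpa using h1, fun c' h' => h2 c' (List.mem_cons_of_mem _ h')⟩, rfl⟩

theorem pv_pairwise_gen (k : Nat) : (pvGen k).Pairwise (· < ·) := by
  induction k with
  | zero => simp [pvGen]
  | succ k ih =>
    rw [pvGen, List.pairwise_cons]
    constructor
    · intro x hx
      obtain ⟨v, _, y, _, rfl⟩ := by simpa only [List.mem_flatMap, List.mem_map] using hx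
      exact List.nil_lt_cons _ _
    · rw [List.pairwise_flatMap]
      refine ⟨fun v _ => ih.map _ (fun a b h => List.cons_lt_cons_self.mpr h), ?_⟩
      have hvow : pvVowels.Pairwise (· < ·) := by decide
      refine hvow.imp_of_mem ?_
      intro a b _ _ hab x hx y hy
      obtain ⟨x', _, rfl⟩ := List.mem_map.mp hx
      obtain ⟨y', _, rfl⟩ := List.mem_map.mp hy
      exact pv_cons_lt_cons _ _ hab _ _

theorem pv_len_gen (k : Nat) : 4 * (pvGen k).length + 1 = 5 ^ (k + 1) := by
  induction k with
  | zero => rfl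
  | succ k ih =>
    have h5 : (5:Nat) ^ (k + 1 + 1) = 5 * 5 ^ (k + 1) := by ring
    simp only [pvGen, pvVowels, List.flatMap_cons, List.flatMap_nil, List.length_cons,
      List.length_append, List.length_map, List.length_nil] at *
    omega

theorem pv_mem_joins (n : Nat) (x : List Char) :
    x ∈ (pvProd n).map (PySem.Chars.join []) ↔ x.length ≤ n ∧ ∀ c ∈ x, c ∈ pvVowels := by
  induction n generalizing x with
  | zero =>
    simp only [pvProd, List.map_cons, List.map_nil, List.mem_singleton, pv_join_eq_flatten,
      List.flatten_nil]
    constructor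
    · rintro rfl; simp
    · rintro ⟨h1, _⟩; exact List.eq_nil_of_length_eq_zero (by omega)
  | succ n ih =>
    constructor
    · intro hx
      obtain ⟨q, hq, rfl⟩ := List.mem_map.mp hx
      obtain ⟨p, hp, t, ht, rfl⟩ := by
        simpa only [pvProd, List.mem_flatMap, List.mem_map] using hq
      have hjt : PySem.Chars.join [] t ∈ (pvProd n).map (PySem.Chars.join []) :=
        List.mem_map_of_mem ht
      obtain ⟨h1, h2⟩ := (ih _).mp hjt
      rw [pv_join_eq_flatten, List.flatten_cons, ← pv_join_eq_flatten]
      fin_cases hp <;>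
        simp only [List.nil_append, List.cons_append, List.length_cons] <;>
        refine ⟨by omega, ?_⟩ <;> intro c hc <;>
        first
          | exact h2 c hc
          | (rcases List.mem_cons.mp hc with rfl | hc'
             · decide
             · exact h2 c hc')
    · rintro ⟨h1, h2⟩
      cases x with
      | nil =>
        have : ([] : List Char) ∈ (pvProd n).map (PySem.Chars.join []) := (ih _).mpr (by simp)
        obtain ⟨t, ht, hjoin⟩ := List.mem_map.mp this
        refine List.mem_map.mpr ⟨[] :: t, ?_, ?_⟩
        · simp only [pvProd, List.mem_flatMap, List.mem_map]
          exact ⟨[], by decide, t, ht, rfl⟩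
        · rw [pv_join_eq_flatten, List.flatten_cons, List.nil_append, ← pv_join_eq_flatten, hjoin]
      | cons c rest =>
        have : rest ∈ (pvProd n).map (PySem.Chars.join []) :=
          (ih _).mpr ⟨by simpa using h1, fun c' h' => h2 c' (List.mem_cons_of_mem _ h')⟩
        obtain ⟨t, ht, hjoin⟩ := List.mem_map.mp this
        refine List.mem_map.mpr ⟨[c] :: t, ?_, ?_⟩
        · simp only [pvProd, List.mem_flatMap, List.mem_map]
          refine ⟨[c], ?_, t, ht, rfl⟩
          have := h2 c List.mem_cons_self
          fin_cases this <;> decide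
        · rw [pv_join_eq_flatten, List.flatten_cons, ← pv_join_eq_flatten, hjoin]
          rfl

theorem pv_sorted_ext {α κ : Type} {i1 : LT κ} {d1 : @DecidableLT κ i1} {i2 : LT κ} {d2 : @DecidableLT κ i2}
    (h : ∀ a b : κ, (@LT.lt _ i1 a b ↔ @LT.lt _ i2 a b)) (xs : List α) (key : α → κ) :
    @PySem.List.sorted α κ i1 d1 xs key false = @PySem.List.sorted α κ i2 d2 xs key false := by
  unfold PySem.List.sorted
  have hfun : (fun (a b : α) => @decide _ (d1 (key a) (key b)))
      = (fun a b => @decide _ (d2 (key a) (key b))) := by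
    funext a b
    exact decide_eq_decide.mpr (h _ _)
  simp only [Bool.false_eq_true, if_false, hfun]

theorem pv_sorted_eq :
    PySem.List.sorted
      ((pvProd 5).foldl (fun s p => PySem.Set.add s (PySem.Chars.join [] p)) PySem.Set.empty)
      (fun x => x) = pvGen 5 := by
  have hdic : (pvProd 5).foldl (fun s p => PySem.Set.add s (PySem.Chars.join [] p)) PySem.Set.empty
      = PySem.Set.update PySem.Set.empty ((pvProd 5).map (PySem.Chars.join [])) := by
    rw [PySem.Set.update, List.foldl_map]
  have h1 : (pvGen 5).Perm
      ((pvProd 5).foldl (fun s p => PySem.Set.add s (PySem.Chars.join [] p)) PySem.Set.empty) := by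
    rw [hdic]
    rw [List.perm_ext_iff_of_nodup ((pv_pairwise_gen 5).imp ne_of_lt)
      (PySem.Set.nodup_update PySem.Set.empty _ (by simp [PySem.Set.empty]))]
    intro a
    rw [PySem.Set.mem_update, pv_mem_gen, pv_mem_joins]
    simp [PySem.Set.empty]
  have h2 : (pvGen 5).Pairwise (fun a b => List.Lex (· < ·) a b) :=
    (pv_pairwise_gen 5).imp (fun hab => (List.lt_iff_lex_lt _ _).mp hab)
  have key := PySem.List.sorted_eq_of_perm_of_pairwise_lt (κ := List Char)
    ((pvProd 5).foldl (fun s p => PySem.Set.add s (PySem.Chars.join [] p)) PySem.Set.empty)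
    (pvGen 5) (fun x => x) h1 h2
  exact (pv_sorted_ext (fun a b => (List.lt_iff_lex_lt a b)) _ _).trans key

theorem pv_find_none (L : List (List Char)) (t : List Char) (s : Int) (h : t ∉ L) :
    pvFind (PySem.List.enumerate L s) t = none := by
  induction L generalizing s with
  | nil => rfl
  | cons w ws ih =>
    rw [PySem.List.enumerate_cons, pvFind,
      if_neg (fun (hw : w = t) => h (hw ▸ List.mem_cons_self)), ih _ (fun hm => h (List.mem_cons_of_mem _ hm))]

theorem pv_find_mem (xs ys : List (List Char)) (t : List Char) (s : Int) (h : t ∈ xs) :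
    pvFind (PySem.List.enumerate (xs ++ ys) s) t = pvFind (PySem.List.enumerate xs s) t := by
  induction xs generalizing s with
  | nil => simp at h
  | cons w ws ih =>
    rw [List.cons_append, PySem.List.enumerate_cons, PySem.List.enumerate_cons, pvFind, pvFind]
    by_cases hw : w = t
    · rw [if_pos hw, if_pos hw]
    · have hm : t ∈ ws := by
        rcases List.mem_cons.mp h with h | h
        · exact absurd h.symm hw
        · exact h
      rw [if_neg hw, if_neg hw, ih _ hm]

theorem pv_find_skip (xs ys : List (List Char)) (t : List Char) (s : Int) (h : t ∉ xs) :
    pvFind (PySem.List.enumerate (xs ++ ys) s) t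
      = pvFind (PySem.List.enumerate ys (s + xs.length)) t := by
  induction xs generalizing s with
  | nil => simp
  | cons w ws ih =>
    rw [List.cons_append, PySem.List.enumerate_cons, pvFind,
      if_neg (fun (hw : w = t) => h (hw ▸ List.mem_cons_self)),
      ih _ (fun hm => h (List.mem_cons_of_mem _ hm))]
    have harg : s + 1 + (ws.length : Int) = s + ((w :: ws).length : Int) := by
      simp only [List.length_cons]
      push_cast
      ring
    rw [harg]

theorem pv_find_map_cons (L : List (List Char)) (c : Char) (rest : List Char) (s : Int) :
    pvFind (PySem.List.enumerate (L.map (c :: ·)) s) (c :: rest)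
      = pvFind (PySem.List.enumerate L s) rest := by
  induction L generalizing s with
  | nil => rfl
  | cons w ws ih =>
    rw [List.map_cons, PySem.List.enumerate_cons, PySem.List.enumerate_cons, pvFind, pvFind]
    by_cases hw : w = rest
    · rw [if_pos (by rw [hw]), if_pos hw]
    · rw [if_neg (by simpa using hw), if_neg hw, ih]

theorem pv_not_mem_block (L : List (List Char)) (v c : Char) (rest : List Char) (h : v ≠ c) :
    (c :: rest) ∉ L.map (v :: ·) := by
  simp only [List.mem_map]
  rintro ⟨y, _, hy⟩
  exact h (List.cons.injEq .. ▸ hy).1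

theorem pv_find_pos (t : List Char) (k : Nat) (s : Int)
    (hlen : t.length ≤ k) (hv : ∀ c ∈ t, c ∈ pvVowels) :
    pvFind (PySem.List.enumerate (pvGen k) s) t = some (s + pvRank k t) := by
  induction t generalizing k s with
  | nil =>
    cases k <;> simp [pvGen, PySem.List.enumerate_cons, pvFind, pv_rank_nil]
  | cons c rest ih =>
    cases k with
    | zero => simp at hlen
    | succ k =>
      have hrest : ∀ c' ∈ rest, c' ∈ pvVowels := fun c' h' => hv c' (List.mem_cons_of_mem _ h')
      have hlen' : rest.length ≤ k := by simpa using hlen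
      have hc : c ∈ pvVowels := hv c List.mem_cons_self
      have hL : ((pvGen k).map (fun y => c :: y)).length = (pvGen k).length := List.length_map ..
      rw [pvGen, PySem.List.enumerate_cons, pvFind, if_neg (by simp)]
      simp only [pvVowels, List.flatMap_cons, List.flatMap_nil, List.append_nil]
      rcases (by simpa [pvVowels] using hc : c = 'A' ∨ c = 'E' ∨ c = 'I' ∨ c = 'O' ∨ c = 'U')
        with rfl | rfl | rfl | rfl | rfl <;>
      · first
        | rw [pv_find_mem _ _ _ _ (by
            exact List.mem_map_of_mem ((pv_mem_gen k rest).mpr ⟨hlen', hrest⟩))]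
        | skip
        repeat rw [pv_find_skip _ _ _ _ (pv_not_mem_block _ _ _ _ (by decide))]
        first
        | rw [pv_find_mem _ _ _ _ (by
            exact List.mem_map_of_mem ((pv_mem_gen k rest).mpr ⟨hlen', hrest⟩))]
        | skip
        rw [pv_find_map_cons, ih _ _ hlen' hrest, pvRank]
        simp only [List.length_map, pvVIdx, if_pos]
        push_cast
        ring

theorem pv_alt_loop (t : List Char) (n : Nat) (r : Int)
    (hlen : t.length + n ≤ 5) (hv : ∀ c ∈ t, c ∈ pvVowels) :
    pvAltLoop (PySem.List.enumerate t (n : Int)) r = r + pvRank (5 - n) t := by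
  induction t generalizing n r with
  | nil => simp [pvAltLoop, pv_rank_nil]
  | cons c rest ih =>
    have hn : n + 1 ≤ 5 := by
      have h0 := hlen
      simp only [List.length_cons] at h0
      omega
    obtain ⟨m, hm⟩ : ∃ m, 5 - n = m + 1 := ⟨4 - n, by omega⟩
    have hc : c ∈ pvVowels := hv c List.mem_cons_self
    have hidx : ((PySem.List.index? pvVowels c).getD 0 : Int) = pvVIdx c := by
      rcases (by simpa [pvVowels] using hc : c = 'A' ∨ c = 'E' ∨ c = 'I' ∨ c = 'O' ∨ c = 'U')
        with rfl | rfl | rfl | rfl | rfl <;> decide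
    have hW : PySem.Int.floordiv ((5 : Int) ^ (5 - (n : Int)).toNat - 1) 4
        = ((pvGen m).length : Int) := by
      have ht : (5 - (n : Int)).toNat = m + 1 := by omega
      have hlg := pv_len_gen m
      rw [ht]
      have hcast : ((5 : Int)) ^ (m + 1) = ((5 ^ (m + 1) : Nat) : Int) := by push_cast; ring
      have h4 : ((5 : Int)) ^ (m + 1) - 1 = 4 * ((pvGen m).length : Int) := by
        rw [hcast, ← hlg]
        push_cast
        ring
      rw [h4, PySem.Int.floordiv_eq_ediv_of_pos (by norm_num), Int.mul_ediv_cancel_left _ (by norm_num)]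
    rw [PySem.List.enumerate_cons, pvAltLoop, hidx, hW]
    have := ih (n + 1) (r + pvVIdx c * ((pvGen m).length : Int) + 1)
      (by simp only [List.length_cons] at hlen; omega) (fun c' h' => hv c' (List.mem_cons_of_mem _ h'))
    push_cast at this ⊢
    rw [this, hm, pvRank]
    have h51 : 4 - n = m := by omega
    rw [h51]
    ring

-- ===== VERDICT (by name: the statement is the Claim_ definition above) =====
theorem solution_spec : Claim_equal_solution := by
  intro word _
  unfold Spec_solution
  simp only [solution, solution_alt]
  by_cases h : 5 < word.toList.length ∨ ∃ c ∈ word.toList, c ∉ pvVowels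
  · rw [if_pos h, pv_sorted_eq, pv_find_none]
    rw [pv_mem_gen]
    rintro ⟨h1, h2⟩
    rcases h with h | ⟨c, hc, hcv⟩
    · omega
    · exact hcv (h2 c hc)
  · push Not at h
    rw [if_neg (by push Not; exact h), pv_sorted_eq,
      pv_find_pos word.toList 5 0 (by omega) h.2]
    have h5 := pv_alt_loop word.toList 0 0 (by omega) h.2
    simp only [Nat.cast_zero] at h5
    rw [h5]
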